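-- pv_equiv track=rewrite | github.com/majunny/Fire-Evacuation-AI-Hackathon- | fireescape/save file/function(map).py | spread_fire
-- ===== SOURCE A (Python) =====
-- NEI4 = [(1, 0), (-1, 0), (0, 1), (0, -1)]
--
-- def inb(r, c, ROWS, COLS):
--     return 0 <= r < ROWS and 0 <= c < COLS
--
-- def spread_fire(fire_cells, blocked, ROWS, COLS):
--     """
--     기존 불의 모든 위치에서 인접한 곳으로 불을 퍼뜨린다.
--     새로운 불 좌표 목록을 반환한다.
--     """
--     newly = set()
--     cur = set(fire_cells)
--     for r, c in fire_cells:
--         for dr, dc in NEI4: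
--             nr, nc = r + dr, c + dc
--             if inb(nr, nc, ROWS, COLS) and not blocked[nr][nc] and (nr, nc) not in cur:
--                 newly.add((nr, nc))
--     return list(newly)
-- ===== SOURCE B (Python) =====
-- def spread_fire(fire_cells, blocked, ROWS, COLS):
--     """Single row-major sweep of the blocked grid itself: for each unblocked,
--     not-yet-burning cell, catch fire iff one of its four neighbours is burning.
--     (Same result as a set; no candidate generation, no dedup.)"""
--     cur = set(fire_cells)
--     out = []
--     for r, row in enumerate(blocked):
--         if r >= ROWS:
--             break
--         for c, b in enumerate(row):
--             if c >= COLS: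
--                 break
--             if not b and (r, c) not in cur and (
--                 (r - 1, c) in cur or (r + 1, c) in cur
--                 or (r, c - 1) in cur or (r, c + 1) in cur):
--                 out.append((r, c))
--     return out
-- ===== Notes on version B (the rewrite author's own statement) =====
-- stated objective: alternative
-- what changed: Instead of expanding outward from each fire cell over the four offsets and deduplicating into a result set, B makes a single row-major sweep over the blocked grid itself and appends each unblocked, not-yet-burning cell whose own four neighbours include a burning cell, needing no candidate generation and no dedup.
import Mathlib
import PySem

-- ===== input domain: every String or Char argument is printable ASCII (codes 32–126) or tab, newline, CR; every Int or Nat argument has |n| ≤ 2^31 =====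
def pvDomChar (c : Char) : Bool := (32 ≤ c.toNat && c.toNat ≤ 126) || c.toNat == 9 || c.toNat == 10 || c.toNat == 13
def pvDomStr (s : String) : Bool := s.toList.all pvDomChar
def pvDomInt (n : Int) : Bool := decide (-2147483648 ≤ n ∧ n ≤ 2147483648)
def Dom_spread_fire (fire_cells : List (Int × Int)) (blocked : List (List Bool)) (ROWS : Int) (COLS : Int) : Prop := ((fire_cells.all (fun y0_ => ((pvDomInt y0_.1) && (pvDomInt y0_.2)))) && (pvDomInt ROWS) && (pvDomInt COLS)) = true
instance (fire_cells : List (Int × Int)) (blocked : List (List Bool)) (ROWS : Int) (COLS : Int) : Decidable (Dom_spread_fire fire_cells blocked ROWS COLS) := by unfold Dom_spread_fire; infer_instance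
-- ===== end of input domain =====

-- B replaces A's per-fire-cell neighbour expansion by a single row-major sweep of the blocked
-- grid that tests each cell's own four neighbours against the fire set (no candidate list, no
-- dedup); return value only, no mutation. A's final list(newly) reads a CPython hash set in an
-- order PySem does not model and the return value is a set (compared as one): both ports render
-- the result set in ascending (row, col) order, which is B's natural output order.
-- ===== PORT A =====
def NEI4 : List (Int × Int) := [(1, 0), (-1, 0), (0, 1), (0, -1)]

def inb (r : Int) (c : Int) (ROWS : Int) (COLS : Int) : Bool :=
  decide (0 ≤ r) && decide (r < ROWS) && decide (0 ≤ c) && decide (c < COLS)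

def spread_fire (fire_cells : List (Int × Int)) (blocked : List (List Bool)) (ROWS : Int) (COLS : Int) : List (Int × Int) :=
  let cur : PySem.Set (Int × Int) := PySem.Set.ofList fire_cells
  let newly : PySem.Set (Int × Int) :=
    fire_cells.foldl (fun newly rc =>
      NEI4.foldl (fun newly dd =>
        let nr := rc.1 + dd.1
        let nc := rc.2 + dd.2
        if inb nr nc ROWS COLS
            && !(PySem.List.pyGetD (PySem.List.pyGetD blocked nr []) nc false)
            && !(PySem.Set.contains cur (nr, nc)) then
          PySem.Set.add newly (nr, nc)
        else newly) newly) PySem.Set.empty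
  -- list(newly): hash-set iteration order is not modelled; render the set sorted by (row, col)
  -- (an injective key on the set, so exact as a set; the output is compared as a set).
  PySem.List.sorted newly (fun p => p.1 * 4294967296 + p.2) false

-- ===== PORT B =====
-- inner loop 'for c, b in enumerate(row)' with 'break' at c >= COLS
def altRow (cur : PySem.Set (Int × Int)) (r : Int) (COLS : Int) (row : List Bool) (c : Int) : List (Int × Int) :=
  match row with
  | [] => []
  | b :: rest =>
    if COLS ≤ c then []
    else
      (if !b && !(PySem.Set.contains cur (r, c))
          && (PySem.Set.contains cur (r - 1, c) || PySem.Set.contains cur (r + 1, c)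
              || PySem.Set.contains cur (r, c - 1) || PySem.Set.contains cur (r, c + 1)) then
        [(r, c)] else []) ++ altRow cur r COLS rest (c + 1)

-- outer loop 'for r, row in enumerate(blocked)' with 'break' at r >= ROWS
def altRows (cur : PySem.Set (Int × Int)) (ROWS : Int) (COLS : Int) (rows : List (List Bool)) (r : Int) : List (Int × Int) :=
  match rows with
  | [] => []
  | row :: rest =>
    if ROWS ≤ r then []
    else altRow cur r COLS row 0 ++ altRows cur ROWS COLS rest (r + 1)

def spread_fire_alt (fire_cells : List (Int × Int)) (blocked : List (List Bool)) (ROWS : Int) (COLS : Int) : List (Int × Int) :=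
  altRows (PySem.Set.ofList fire_cells) ROWS COLS blocked 0

-- ===== PRECONDITION & SPEC =====
-- Pre_ excludes exactly the inputs on which Python A raises IndexError: an in-bounds
-- neighbour of a fire cell whose row/column is missing from the blocked grid.
def Pre_spread_fire (fire_cells : List (Int × Int)) (blocked : List (List Bool)) (ROWS : Int) (COLS : Int) : Prop :=
  ∀ p ∈ fire_cells, ∀ d ∈ NEI4,
    (0 ≤ p.1 + d.1 ∧ p.1 + d.1 < ROWS ∧ 0 ≤ p.2 + d.2 ∧ p.2 + d.2 < COLS) →
      p.1 + d.1 < (blocked.length : Int) ∧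
      p.2 + d.2 < ((PySem.List.pyGetD blocked (p.1 + d.1) []).length : Int)
instance (fire_cells : List (Int × Int)) (blocked : List (List Bool)) (ROWS : Int) (COLS : Int) : Decidable (Pre_spread_fire fire_cells blocked ROWS COLS) := by unfold Pre_spread_fire; infer_instance

def pvWitness_spread_fire : (List (Int × Int)) × List (List Bool) × Int × Int :=
  ([(0, 0)], [[false, false], [false, true]], 2, 2)

def Spec_spread_fire (fire_cells : List (Int × Int)) (blocked : List (List Bool)) (ROWS : Int) (COLS : Int) (out : List (Int × Int)) : Prop := out = spread_fire_alt fire_cells blocked ROWS COLS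
instance (fire_cells : List (Int × Int)) (blocked : List (List Bool)) (ROWS : Int) (COLS : Int) (out : List (Int × Int)) : Decidable (Spec_spread_fire fire_cells blocked ROWS COLS out) := by unfold Spec_spread_fire; infer_instance

-- ===== CLAIM (what is proved, stated in full; the proofs are below) =====
def Claim_equal_spread_fire : Prop := ∀ (fire_cells : List (Int × Int)) (blocked : List (List Bool)) (ROWS : Int) (COLS : Int), Dom_spread_fire fire_cells blocked ROWS COLS → Pre_spread_fire fire_cells blocked ROWS COLS → Spec_spread_fire fire_cells blocked ROWS COLS (spread_fire fire_cells blocked ROWS COLS)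

-- ===== LEMMAS AND PROOFS =====

-- membership through a foldl whose step adds elements described by Q
theorem mem_foldl_step {α β : Type} (step : List β → α → List β) (Q : α → β → Prop)
    (h : ∀ s x y, y ∈ step s x ↔ y ∈ s ∨ Q x y) (l : List α) (s : List β) (y : β) :
    y ∈ l.foldl step s ↔ y ∈ s ∨ ∃ x ∈ l, Q x y := by
  induction l generalizing s with
  | nil => simp
  | cons a t ih => rw [List.foldl_cons, ih]; rw [h]; simp; tauto

theorem nodup_foldl_step {α β : Type} (step : List β → α → List β)
    (h : ∀ s x, s.Nodup → (step s x).Nodup) (l : List α) (s : List β) (hs : s.Nodup) :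
    (l.foldl step s).Nodup := by
  induction l generalizing s with
  | nil => exact hs
  | cons a t ih => exact ih _ (h s a hs)

theorem mem_if_add {β : Type} [BEq β] [LawfulBEq β] (s : PySem.Set β) (P : Bool) (v y : β) :
    (y ∈ if P then PySem.Set.add s v else s) ↔ y ∈ s ∨ (P = true ∧ y = v) := by
  split <;> simp_all [PySem.Set.mem_add]

theorem nodup_if_add {β : Type} [BEq β] [LawfulBEq β] (s : PySem.Set β) (P : Bool) (v : β)
    (hs : s.Nodup) : (if P then PySem.Set.add s v else s).Nodup := by
  split
  · exact PySem.Set.nodup_add _ _ hs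
  · exact hs

-- the condition A tests for the neighbour rc + dd
def condA (fire_cells : List (Int × Int)) (blocked : List (List Bool)) (ROWS : Int) (COLS : Int)
    (rc dd : Int × Int) : Bool :=
  inb (rc.1 + dd.1) (rc.2 + dd.2) ROWS COLS
    && !(PySem.List.pyGetD (PySem.List.pyGetD blocked (rc.1 + dd.1) []) (rc.2 + dd.2) false)
    && !(PySem.Set.contains (PySem.Set.ofList fire_cells) (rc.1 + dd.1, rc.2 + dd.2))

def spreadSet (fire_cells : List (Int × Int)) (blocked : List (List Bool)) (ROWS : Int) (COLS : Int) : PySem.Set (Int × Int) :=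
  fire_cells.foldl (fun newly rc =>
    NEI4.foldl (fun newly dd =>
      if condA fire_cells blocked ROWS COLS rc dd then
        PySem.Set.add newly (rc.1 + dd.1, rc.2 + dd.2)
      else newly) newly) PySem.Set.empty

theorem spread_fire_eq_sorted (fire_cells : List (Int × Int)) (blocked : List (List Bool)) (ROWS COLS : Int) :
    spread_fire fire_cells blocked ROWS COLS
      = PySem.List.sorted (spreadSet fire_cells blocked ROWS COLS) (fun p => p.1 * 4294967296 + p.2) false := by
  rfl

theorem mem_spreadSet (fire_cells : List (Int × Int)) (blocked : List (List Bool)) (ROWS COLS : Int) (y : Int × Int) :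
    y ∈ spreadSet fire_cells blocked ROWS COLS ↔
      ∃ rc ∈ fire_cells, ∃ dd ∈ NEI4,
        condA fire_cells blocked ROWS COLS rc dd = true ∧ y = (rc.1 + dd.1, rc.2 + dd.2) := by
  unfold spreadSet
  rw [mem_foldl_step _ (fun rc y => ∃ dd ∈ NEI4,
      condA fire_cells blocked ROWS COLS rc dd = true ∧ y = (rc.1 + dd.1, rc.2 + dd.2))]
  · simp [PySem.Set.empty]
  · intro s rc z
    rw [mem_foldl_step _ (fun dd y =>
        condA fire_cells blocked ROWS COLS rc dd = true ∧ y = (rc.1 + dd.1, rc.2 + dd.2))]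
    intro s' dd z'
    exact mem_if_add _ _ _ _

theorem nodup_spreadSet (fire_cells : List (Int × Int)) (blocked : List (List Bool)) (ROWS COLS : Int) :
    (spreadSet fire_cells blocked ROWS COLS).Nodup := by
  unfold spreadSet
  refine nodup_foldl_step _ ?_ _ _ (by simp [PySem.Set.empty])
  intro s rc hs
  refine nodup_foldl_step _ ?_ _ _ hs
  intro s' dd hs'
  exact nodup_if_add _ _ _ hs'

-- the condition B tests at cell (r, c)
def condB (cur : PySem.Set (Int × Int)) (b : Bool) (r c : Int) : Bool :=
  !b && !(PySem.Set.contains cur (r, c))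
    && (PySem.Set.contains cur (r - 1, c) || PySem.Set.contains cur (r + 1, c)
        || PySem.Set.contains cur (r, c - 1) || PySem.Set.contains cur (r, c + 1))

theorem altRow_eq (cur : PySem.Set (Int × Int)) (r COLS : Int) (b : Bool) (rest : List Bool) (c : Int) :
    altRow cur r COLS (b :: rest) c
      = if COLS ≤ c then []
        else (if condB cur b r c then [(r, c)] else []) ++ altRow cur r COLS rest (c + 1) := by
  rfl

theorem mem_altRow (cur : PySem.Set (Int × Int)) (r COLS : Int) (row : List Bool) (c : Int) (p : Int × Int) :
    p ∈ altRow cur r COLS row c ↔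
      ∃ k : Nat, ∃ b, row[k]? = some b ∧ c + (k : Int) < COLS ∧ p = (r, c + (k : Int))
        ∧ condB cur b r (c + (k : Int)) = true := by
  induction row generalizing c with
  | nil => simp [altRow]
  | cons b rest ih =>
    rw [altRow_eq]
    split
    · rename_i hb
      simp only [List.not_mem_nil, false_iff]
      rintro ⟨k, b', _, hk, _, _⟩
      omega
    · rename_i hb
      rw [List.mem_append, ih]
      constructor
      · rintro (hp | ⟨k, b', hget, hk, hpe, hc⟩)
        · by_cases h : condB cur b r c = true
          · rw [if_pos h] at hp
            simp only [List.mem_singleton] at hp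
            exact ⟨0, b, by simp, by simpa using hb, by simpa using hp, by simpa using h⟩
          · rw [if_neg h] at hp
            exact absurd hp (List.not_mem_nil)
        · have hadd : c + 1 + (k : Int) = c + ((k : Int) + 1) := by ring
          refine ⟨k + 1, b', by simpa using hget, by push_cast; omega, ?_, ?_⟩
          · rw [hpe]; simp only [Prod.mk.injEq, true_and]; push_cast; ring
          · push_cast
            rw [← hadd]
            exact hc
      · rintro ⟨k, b', hget, hk, hpe, hc⟩
        cases k with
        | zero =>
          left
          simp only [List.getElem?_cons_zero, Option.some.injEq] at hget
          subst hget
          simp only [Nat.cast_zero, add_zero] at hpe hc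
          rw [if_pos hc]
          simp [hpe]
        | succ k =>
          right
          have hadd : c + ((k : Int) + 1) = c + 1 + (k : Int) := by ring
          push_cast at hk hpe hc
          refine ⟨k, b', by simpa using hget, by omega, ?_, ?_⟩
          · rw [hpe]; simp only [Prod.mk.injEq, true_and]; ring
          · rw [← hadd]; exact hc

theorem mem_altRows (cur : PySem.Set (Int × Int)) (ROWS COLS : Int) (rows : List (List Bool)) (r : Int) (p : Int × Int) :
    p ∈ altRows cur ROWS COLS rows r ↔
      ∃ k : Nat, ∃ row, rows[k]? = some row ∧ r + (k : Int) < ROWS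
        ∧ p ∈ altRow cur (r + (k : Int)) COLS row 0 := by
  induction rows generalizing r with
  | nil => simp [altRows]
  | cons row rest ih =>
    show p ∈ (if ROWS ≤ r then [] else altRow cur r COLS row 0 ++ altRows cur ROWS COLS rest (r + 1)) ↔ _
    split
    · rename_i hr
      simp only [List.not_mem_nil, false_iff]
      rintro ⟨k, row', _, hk, _⟩
      omega
    · rename_i hr
      rw [List.mem_append, ih]
      constructor
      · rintro (hp | ⟨k, row', hget, hk, hmem⟩)
        · exact ⟨0, row, by simp, by omega, by simpa using hp⟩
        · have hadd : r + 1 + (k : Int) = r + ((k : Int) + 1) := by ring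
          refine ⟨k + 1, row', by simpa using hget, by push_cast; omega, ?_⟩
          push_cast
          rw [← hadd]
          exact hmem
      · rintro ⟨k, row', hget, hk, hmem⟩
        cases k with
        | zero =>
          left
          simp only [List.getElem?_cons_zero, Option.some.injEq] at hget
          subst hget
          simpa using hmem
        | succ k =>
          right
          have hadd : r + ((k : Int) + 1) = r + 1 + (k : Int) := by ring
          push_cast at hk hmem
          refine ⟨k, row', by simpa using hget, by omega, ?_⟩
          rw [← hadd]
          exact hmem

-- elements produced by B: coordinates and strict ordering
theorem altRow_shape (cur : PySem.Set (Int × Int)) (r COLS : Int) (row : List Bool) (c : Int)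
    (p : Int × Int) (hp : p ∈ altRow cur r COLS row c) :
    p.1 = r ∧ c ≤ p.2 ∧ p.2 < COLS := by
  rw [mem_altRow] at hp
  obtain ⟨k, b, _, hk, hpe, _⟩ := hp
  subst hpe
  refine ⟨rfl, by push_cast; omega, hk⟩

theorem pairwise_altRow (cur : PySem.Set (Int × Int)) (r COLS : Int) (row : List Bool) (c : Int) :
    (altRow cur r COLS row c).Pairwise (fun p q => p.2 < q.2) := by
  induction row generalizing c with
  | nil => simp [altRow]
  | cons b rest ih =>
    rw [altRow_eq]
    split
    · simp
    · rw [List.pairwise_append]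
      refine ⟨?_, ih _, ?_⟩
      · split <;> simp
      · intro p hp q hq
        have hq' := (altRow_shape _ _ _ _ _ _ hq).2.1
        by_cases h : condB cur b r c = true
        · rw [if_pos h] at hp
          simp only [List.mem_singleton] at hp
          subst hp
          show c < q.2
          omega
        · rw [if_neg h] at hp
          exact absurd hp (List.not_mem_nil)

theorem altRows_shape (cur : PySem.Set (Int × Int)) (ROWS COLS : Int) (rows : List (List Bool)) (r : Int)
    (p : Int × Int) (hp : p ∈ altRows cur ROWS COLS rows r) :
    r ≤ p.1 ∧ p.1 < ROWS ∧ 0 ≤ p.2 ∧ p.2 < COLS := by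
  rw [mem_altRows] at hp
  obtain ⟨k, row, _, hk, hmem⟩ := hp
  obtain ⟨hA, hB, hC⟩ := altRow_shape _ _ _ _ _ _ hmem
  refine ⟨by omega, by omega, by omega, hC⟩

theorem pairwise_altRows (cur : PySem.Set (Int × Int)) (ROWS COLS : Int) (rows : List (List Bool)) (r : Int) :
    (altRows cur ROWS COLS rows r).Pairwise
      (fun p q => p.1 < q.1 ∨ (p.1 = q.1 ∧ p.2 < q.2)) := by
  induction rows generalizing r with
  | nil => simp [altRows]
  | cons row rest ih =>
    show List.Pairwise _ (if ROWS ≤ r then [] else altRow cur r COLS row 0 ++ altRows cur ROWS COLS rest (r + 1))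
    split
    · simp
    · rw [List.pairwise_append]
      refine ⟨?_, ih _, ?_⟩
      · refine (pairwise_altRow cur r COLS row 0).imp_of_mem ?_
        intro p q hp hq h
        have h1 := altRow_shape _ _ _ _ _ _ hp
        have h2 := altRow_shape _ _ _ _ _ _ hq
        exact Or.inr ⟨h1.1.trans h2.1.symm, h⟩
      · intro p hp q hq
        have h1 := altRow_shape _ _ _ _ _ _ hp
        have h2 := altRows_shape _ _ _ _ _ _ hq
        left; omega

-- ===== VERDICT helper: membership equality under Pre_ =====
theorem mem_eq (fire_cells : List (Int × Int)) (blocked : List (List Bool)) (ROWS COLS : Int)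
    (hpre : Pre_spread_fire fire_cells blocked ROWS COLS) (p : Int × Int) :
    p ∈ spreadSet fire_cells blocked ROWS COLS ↔
      p ∈ altRows (PySem.Set.ofList fire_cells) ROWS COLS blocked 0 := by
  rw [mem_spreadSet, mem_altRows]
  constructor
  · rintro ⟨rc, hrc, dd, hdd, hcond, hpe⟩
    subst hpe
    unfold condA inb at hcond
    simp only [Bool.and_eq_true, decide_eq_true_eq, Bool.not_eq_true'] at hcond
    obtain ⟨⟨⟨⟨⟨h0r, hrR⟩, h0c⟩, hcC⟩, hblk⟩, hcur⟩ := hcond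
    obtain ⟨hlen1, hlen2⟩ := hpre rc hrc dd hdd ⟨h0r, hrR, h0c, hcC⟩
    set nr := rc.1 + dd.1 with hnr
    set nc := rc.2 + dd.2 with hnc
    obtain ⟨k, hk⟩ : ∃ k : Nat, (k : Int) = nr := ⟨nr.toNat, by omega⟩
    obtain ⟨j, hj⟩ : ∃ j : Nat, (j : Int) = nc := ⟨nc.toNat, by omega⟩
    have hkl : k < blocked.length := by omega
    have hrow : PySem.List.pyGetD blocked nr [] = blocked[k] := by
      rw [← hk, PySem.List.pyGetD_natCast, List.getD_eq_getElem?_getD, List.getElem?_eq_getElem hkl]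
      rfl
    have hjl : j < blocked[k].length := by
      rw [hrow] at hlen2; omega
    refine ⟨k, blocked[k], by rw [List.getElem?_eq_getElem hkl], by omega, ?_⟩
    rw [mem_altRow]
    refine ⟨j, blocked[k][j], by rw [List.getElem?_eq_getElem hjl], by omega, by
      simp only [zero_add]; rw [hk, hj], ?_⟩
    have hbv : blocked[k][j] = false := by
      rw [hrow] at hblk
      rw [← hj, PySem.List.pyGetD_natCast, List.getD_eq_getElem?_getD,
        List.getElem?_eq_getElem hjl] at hblk
      exact hblk
    unfold condB
    simp only [zero_add, hk, hj, hbv, Bool.not_false, Bool.and_eq_true, Bool.not_eq_true',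
      Bool.or_eq_true, true_and]
    refine ⟨by simpa using hcur, ?_⟩
    have hfc : PySem.Set.contains (PySem.Set.ofList fire_cells) rc = true := by
      rw [PySem.Set.contains_iff, PySem.Set.mem_ofList]; exact hrc
    have hrc2 : rc = (nr - dd.1, nc - dd.2) := by
      apply Prod.ext <;> simp <;> omega
    simp only [NEI4, List.mem_cons, List.not_mem_nil, or_false] at hdd
    rcases hdd with h | h | h | h <;> subst h <;> simp at hrc2 <;>
      rw [hrc2] at hfc <;> tauto
  · rintro ⟨k, row, hget, hkR, hmem⟩
    rw [mem_altRow] at hmem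
    obtain ⟨j, b, hgetj, hjC, hpe, hcond⟩ := hmem
    simp only [zero_add] at hjC hpe hcond
    unfold condB at hcond
    simp only [Bool.and_eq_true, Bool.not_eq_true', Bool.or_eq_true] at hcond
    obtain ⟨⟨hb, hcur⟩, hnbr⟩ := hcond
    subst hb hpe
    have hkl : k < blocked.length := by
      by_contra h
      rw [List.getElem?_eq_none (by omega)] at hget
      simp at hget
    have hrowv : blocked[k] = row := by
      rw [List.getElem?_eq_getElem hkl] at hget
      exact Option.some.inj hget
    have hjl : j < row.length := by
      by_contra h
      rw [List.getElem?_eq_none (by omega)] at hgetj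
      simp at hgetj
    have hbv : row[j] = false := by
      rw [List.getElem?_eq_getElem hjl] at hgetj
      exact Option.some.inj hgetj
    -- the burning neighbour gives the fire cell and the direction
    simp only [PySem.Set.contains_iff, PySem.Set.mem_ofList] at hnbr
    have hnbr' : ∃ rc ∈ fire_cells, ∃ dd ∈ NEI4,
        ((k : Int), (j : Int)) = (rc.1 + dd.1, rc.2 + dd.2) := by
      rcases hnbr with ((h | h) | h) | h
      · exact ⟨_, h, (1, 0), by simp [NEI4], by apply Prod.ext <;> simp⟩
      · exact ⟨_, h, (-1, 0), by simp [NEI4], by apply Prod.ext <;> simp⟩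
      · exact ⟨_, h, (0, 1), by simp [NEI4], by apply Prod.ext <;> simp⟩
      · exact ⟨_, h, (0, -1), by simp [NEI4], by apply Prod.ext <;> simp⟩
    obtain ⟨rc, hrc, dd, hdd, hpe⟩ := hnbr'
    refine ⟨rc, hrc, dd, hdd, ?_, hpe⟩
    have h1 : rc.1 + dd.1 = (k : Int) := by
      have := congrArg Prod.fst hpe; simpa using this.symm
    have h2 : rc.2 + dd.2 = (j : Int) := by
      have := congrArg Prod.snd hpe; simpa using this.symm
    have hrow : PySem.List.pyGetD blocked (k : Int) [] = row := by
      rw [PySem.List.pyGetD_natCast, List.getD_eq_getElem?_getD, List.getElem?_eq_getElem hkl,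
        Option.getD_some, hrowv]
    have hbk : PySem.List.pyGetD (PySem.List.pyGetD blocked (k : Int) []) (j : Int) false = false := by
      rw [hrow, PySem.List.pyGetD_natCast, List.getD_eq_getElem?_getD,
        List.getElem?_eq_getElem hjl, Option.getD_some, hbv]
    unfold condA inb
    simp only [Bool.and_eq_true, Bool.not_eq_true', decide_eq_true_eq]
    refine ⟨⟨⟨⟨⟨?_, ?_⟩, ?_⟩, ?_⟩, ?_⟩, ?_⟩
    · omega
    · omega
    · omega
    · omega
    · rw [h1, h2]; exact hbk
    · rw [h1, h2]
      simpa using hcur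

theorem nodup_alt (cur : PySem.Set (Int × Int)) (ROWS COLS : Int) (rows : List (List Bool)) :
    (altRows cur ROWS COLS rows 0).Nodup := by
  refine (pairwise_altRows cur ROWS COLS rows 0).imp ?_
  intro p q h hpq
  subst hpq
  omega

-- ===== VERDICT (by name: the statement is the Claim_ definition above) =====
set_option maxHeartbeats 1600000 in
theorem spread_fire_spec : Claim_equal_spread_fire := by
  intro fire_cells blocked ROWS COLS hdom hpre
  unfold Spec_spread_fire spread_fire_alt
  rw [spread_fire_eq_sorted]
  have hCOLS : COLS ≤ 4294967296 := by
    unfold Dom_spread_fire pvDomInt at hdom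
    simp only [Bool.and_eq_true, decide_eq_true_eq] at hdom
    omega
  refine PySem.List.sorted_eq_of_perm_of_pairwise_lt _ _ _ ?_ ?_
  · rw [List.perm_ext_iff_of_nodup (nodup_alt _ _ _ _) (nodup_spreadSet _ _ _ _)]
    intro p
    exact (mem_eq fire_cells blocked ROWS COLS hpre p).symm
  · refine (pairwise_altRows _ ROWS COLS blocked 0).imp_of_mem ?_
    intro p q hp hq h
    have h1 := altRows_shape _ _ _ _ _ _ hp
    have h2 := altRows_shape _ _ _ _ _ _ hq
    rcases h with h | ⟨he, h⟩
    · have : p.2 < 4294967296 := by omega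
      have : 0 ≤ q.2 := h2.2.2.1
      nlinarith [h1.2.2.1, h2.2.2.2]
    · rw [he]; omega
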